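-- pv_equiv track=rewrite | github.com/thaju-cse/Photo_manipulation_project | Edx C and Python/169167905-main/test_plates/plates.py | valid_numbers_position
-- ===== SOURCE A (Python) =====
-- def valid_numbers_position(s):
--     number_started = False
--     for i in range(len(s)):
--         if s[i].isdigit():
--             if i == 0 or i == 1:  # the first or second character is a digit
--                 return False
--             if s[i] == '0' and (i == 2 or s[i-1].isalpha()):  # first number is '0'
--                 return False
--             number_started = True
--         elif number_started:  # found a letter after number started
--             return False
--     return True
-- ===== SOURCE B (Python) =====
-- def valid_numbers_position(s):
--     first = next((i for i, c in enumerate(s) if c.isdigit()), None)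
--     if first is None:
--         return True
--     if first < 2:
--         return False
--     if not all(c.isdigit() for c in s[first:]):
--         return False
--     return not (s[first] == '0' and (first == 2 or s[first - 1].isalpha()))
-- ===== Notes on version B (the rewrite author's own statement) =====
-- stated objective: simpler
-- what changed: Replaced A's single stateful index loop (number_started flag, per-position early returns) by a decomposition: locate the first digit, reject if it starts before index 2, require an all-digit tail, and apply the zero rule only to that first digit.
import Mathlib
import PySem

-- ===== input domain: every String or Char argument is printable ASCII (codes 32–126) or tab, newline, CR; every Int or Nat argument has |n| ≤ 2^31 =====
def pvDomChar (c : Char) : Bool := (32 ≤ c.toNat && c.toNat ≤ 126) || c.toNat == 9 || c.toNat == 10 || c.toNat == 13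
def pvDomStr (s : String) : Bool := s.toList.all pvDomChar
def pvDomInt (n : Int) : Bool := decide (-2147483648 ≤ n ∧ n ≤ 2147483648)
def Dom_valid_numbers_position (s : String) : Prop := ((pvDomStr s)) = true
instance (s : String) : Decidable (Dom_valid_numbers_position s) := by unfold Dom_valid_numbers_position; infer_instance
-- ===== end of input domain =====

-- B replaces A's stateful index loop by a decomposition: find the first digit, then
-- validate the boundary, the all-digit tail, and the zero rule at that first digit only
-- (objective: simpler).

-- ===== PORT A =====
-- the for-loop over range(len(s)) with the mutable flag number_started and early returns
def valid_numbers_position_go (cs : List Char) (i : Nat) (numberStarted : Bool) : Bool :=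
  if h : i < cs.length then
    if cs[i].isDigit then
      if i = 0 ∨ i = 1 then false
      else if cs[i] = '0' ∧ (i = 2 ∨ (cs[i-1]!).isAlpha) then false
      else valid_numbers_position_go cs (i+1) true
    else if numberStarted then false
    else valid_numbers_position_go cs (i+1) numberStarted
  else true
termination_by cs.length - i

def valid_numbers_position (s : String) : Bool :=
  valid_numbers_position_go s.toList 0 false

-- ===== PORT B =====
-- first digit index (next(... enumerate ...)), then the three segment checks
def valid_numbers_position_altCore (cs : List Char) : Bool :=
  match cs.findIdx? Char.isDigit with
  | none => true
  | some first =>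
    if first < 2 then false
    else if ¬ ((cs.drop first).all Char.isDigit) then false
    else !(decide ((cs[first]!) = '0' ∧ (first = 2 ∨ (cs[first-1]!).isAlpha)))

def valid_numbers_position_alt (s : String) : Bool :=
  valid_numbers_position_altCore s.toList

-- ===== PRECONDITION & SPEC =====
def Spec_valid_numbers_position (s : String) (out : Bool) : Prop := out = valid_numbers_position_alt s
instance (s : String) (out : Bool) : Decidable (Spec_valid_numbers_position s out) := by unfold Spec_valid_numbers_position; infer_instance

-- ===== CLAIM (what is proved, stated in full; the proofs are below) =====
def Claim_equal_valid_numbers_position : Prop := ∀ (s : String), Dom_valid_numbers_position s → Spec_valid_numbers_position s (valid_numbers_position s)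

-- ===== LEMMAS AND PROOFS =====

theorem digit_not_alpha (c : Char) (h : c.isDigit = true) : c.isAlpha = false := by
  have h0 : '0'.val.toNat = 48 := rfl
  have h9 : '9'.val.toNat = 57 := rfl
  have hA : 'A'.val.toNat = 65 := rfl
  have hZ : 'Z'.val.toNat = 90 := rfl
  have ha : 'a'.val.toNat = 97 := rfl
  have hz : 'z'.val.toNat = 122 := rfl
  simp only [Char.isDigit, Char.isAlpha, Char.isUpper, Char.isLower, Bool.and_eq_true,
    Bool.or_eq_false_iff, Bool.and_eq_false_iff, decide_eq_true_eq, decide_eq_false_iff_not,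
    not_le, ge_iff_le, UInt32.le_iff_toNat_le] at *
  omega

-- once the flag is set and the first digit's rules passed, A just demands an all-digit tail
theorem go_true_eq (cs : List Char) (i : Nat) (h3 : 3 ≤ i)
    (hlt : i - 1 < cs.length) (hd : cs[i-1]'hlt |>.isDigit) :
    valid_numbers_position_go cs i true = (cs.drop i).all Char.isDigit := by
  rw [valid_numbers_position_go]
  by_cases h : i < cs.length
  · rw [List.drop_eq_getElem_cons h, List.all_cons, dif_pos h]
    by_cases hdig : cs[i].isDigit
    · have h01 : ¬ (i = 0 ∨ i = 1) := by omega
      have hprev : (cs[i-1]!).isAlpha = false := by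
        rw [getElem!_pos cs (i-1) hlt]; exact digit_not_alpha _ hd
      have hzero : ¬ (cs[i] = '0' ∧ (i = 2 ∨ (cs[i-1]!).isAlpha)) := by
        rintro ⟨-, h2 | ha⟩
        · omega
        · rw [hprev] at ha; exact Bool.false_ne_true ha
      have hrec := go_true_eq cs (i+1) (by omega)
        (by simpa using h) (by simpa using hdig)
      rw [if_pos hdig, if_neg h01, if_neg hzero, hrec, hdig, Bool.true_and]
    · simp [hdig]
  · rw [dif_neg h, List.drop_eq_nil_of_le (by omega), List.all_nil]
termination_by cs.length - i

-- while the flag is unset (no digit yet before i), A's remaining loop computes B's answer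
theorem go_false_eq (cs : List Char) (i : Nat)
    (hnd : ∀ j, j < i → (hj : j < cs.length) → (cs[j]'hj).isDigit = false) :
    valid_numbers_position_go cs i false = valid_numbers_position_altCore cs := by
  rw [valid_numbers_position_go]
  by_cases h : i < cs.length
  · by_cases hdig : cs[i].isDigit
    · have hfind : cs.findIdx? Char.isDigit = some i := by
        rw [List.findIdx?_eq_some_iff_getElem]
        exact ⟨h, hdig, fun j hji => by simp [hnd j hji (by omega)]⟩
      unfold valid_numbers_position_altCore
      simp only [hfind]
      rw [dif_pos h, if_pos hdig]
      by_cases h01 : i = 0 ∨ i = 1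
      · rw [if_pos h01]
        simp [show i < 2 by omega]
      · have hi2 : ¬ i < 2 := by omega
        rw [if_neg h01]
        by_cases hzero : cs[i] = '0' ∧ (i = 2 ∨ (cs[i-1]!).isAlpha)
        · have hz' : decide ((cs[i]!) = '0' ∧ (i = 2 ∨ (cs[i-1]!).isAlpha = true)) = true := by
            rw [getElem!_pos cs i h]; exact decide_eq_true hzero
          rw [if_pos hzero]
          by_cases hall : (cs.drop i).all Char.isDigit
          · rw [if_neg hi2, if_neg (not_not_intro hall), hz']; rfl
          · rw [if_neg hi2, if_pos hall]
        · have hz' : decide ((cs[i]!) = '0' ∧ (i = 2 ∨ (cs[i-1]!).isAlpha = true)) = false := by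
            rw [getElem!_pos cs i h]; exact decide_eq_false hzero
          rw [if_neg hzero]
          have hrec := go_true_eq cs (i+1) (by omega) (by simpa using h) (by simpa using hdig)
          rw [hrec, List.drop_eq_getElem_cons h, List.all_cons, hdig, Bool.true_and]
          by_cases hall : (cs.drop (i+1)).all Char.isDigit
          · rw [if_neg hi2, if_neg (not_not_intro hall), hz', hall]; rfl
          · rw [if_neg hi2, if_pos hall]
            simp only [Bool.not_eq_true] at hall
            exact hall
    · have hrec := go_false_eq cs (i+1) (by
        intro j hj hjl
        rcases Nat.lt_succ_iff_lt_or_eq.mp hj with hlt | rfl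
        · exact hnd j hlt hjl
        · simpa using hdig)
      simp [h, hdig, hrec]
  · have hnone : cs.findIdx? Char.isDigit = none := by
      rw [List.findIdx?_eq_none_iff]
      intro x hx
      obtain ⟨j, hj, rfl⟩ := List.mem_iff_getElem.mp hx
      exact hnd j (by omega) hj
    simp [h, valid_numbers_position_altCore, hnone]
termination_by cs.length - i

-- ===== VERDICT (by name: the statement is the Claim_ definition above) =====
theorem valid_numbers_position_spec : Claim_equal_valid_numbers_position := by
  intro s _
  unfold Spec_valid_numbers_position valid_numbers_position valid_numbers_position_alt
  exact go_false_eq s.toList 0 (fun j hj _ => by omega)
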